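-- pv_equiv track=rewrite | github.com/Luizln10/AULA-08-PYTHON-IA | atv5.py | produto_mais_vendido
-- ===== SOURCE A (Python) =====
-- def produto_mais_vendido(vendas):
--     max_vendas = 0
--     produtos_mais_vendidos = []
--
--     for produto, quantidade in vendas.items():
--         if quantidade > max_vendas:
--             max_vendas = quantidade
--             produtos_mais_vendidos = [produto]
--         elif quantidade == max_vendas:
--             produtos_mais_vendidos.append(produto)
--
--     return produtos_mais_vendidos, max_vendas
-- ===== SOURCE B (Python) =====
-- def produto_mais_vendido(vendas):
--     m = max([0, *vendas.values()])
--     return [p for p, q in vendas.items() if q == m], m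
-- ===== Notes on version B (the rewrite author's own statement) =====
-- stated objective: simpler
-- what changed: Replaces A's fused single loop that maintains a running maximum and rebuilds/extends the tie list as it goes with a two-pass decomposition: first compute the target maximum (with 0 as floor/default, as A does), then collect all products at that maximum in one filter.
import Mathlib
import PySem

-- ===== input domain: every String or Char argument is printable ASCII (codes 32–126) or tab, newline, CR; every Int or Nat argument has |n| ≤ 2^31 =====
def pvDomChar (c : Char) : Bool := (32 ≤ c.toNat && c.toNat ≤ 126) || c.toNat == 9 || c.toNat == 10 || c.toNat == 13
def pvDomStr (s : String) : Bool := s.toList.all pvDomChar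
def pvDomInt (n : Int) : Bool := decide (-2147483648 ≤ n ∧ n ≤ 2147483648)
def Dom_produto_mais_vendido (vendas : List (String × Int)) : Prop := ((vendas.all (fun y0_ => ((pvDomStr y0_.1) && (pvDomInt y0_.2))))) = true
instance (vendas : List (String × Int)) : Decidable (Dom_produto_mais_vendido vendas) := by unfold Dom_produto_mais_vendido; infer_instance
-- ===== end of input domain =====

-- B replaces A's fused running-max-and-accumulate loop by a two-pass find-max-then-filter
-- decomposition (objective: simpler); return value only, no mutation involved.

-- ===== PORT A =====
-- A's for-loop over vendas.items() with state (max_vendas, produtos_mais_vendidos)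
def pmvLoop : List (String × Int) → Int → List String → List String × Int
  | [], m, acc => (acc, m)
  | (p, q) :: rest, m, acc =>
    if q > m then pmvLoop rest q [p]
    else if q = m then pmvLoop rest m (acc ++ [p])
    else pmvLoop rest m acc

def produto_mais_vendido (vendas : List (String × Int)) : List String × Int :=
  pmvLoop vendas 0 []

-- ===== PORT B =====
-- m = max([0, *vendas.values()]); return [p for p, q in vendas.items() if q == m], m
def produto_mais_vendido_alt (vendas : List (String × Int)) : List String × Int :=
  let m : Int := (vendas.map Prod.snd).foldl max 0
  ((vendas.filter (fun pq => pq.2 == m)).map Prod.fst, m)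

-- ===== PRECONDITION & SPEC =====
def Spec_produto_mais_vendido (vendas : List (String × Int)) (out : List String × Int) : Prop := out = produto_mais_vendido_alt vendas
instance (vendas : List (String × Int)) (out : List String × Int) : Decidable (Spec_produto_mais_vendido vendas out) := by unfold Spec_produto_mais_vendido; infer_instance

-- ===== CLAIM (what is proved, stated in full; the proofs are below) =====
def Claim_equal_produto_mais_vendido : Prop := ∀ (vendas : List (String × Int)), Dom_produto_mais_vendido vendas → Spec_produto_mais_vendido vendas (produto_mais_vendido vendas)

-- ===== LEMMAS AND PROOFS =====
lemma foldl_max_ge (l : List Int) : ∀ m : Int, m ≤ l.foldl max m := by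
  induction l with
  | nil => intro m; simp
  | cons x xs ih =>
    intro m
    exact le_trans (le_max_left m x) (ih (max m x))

lemma pmvLoop_eq (l : List (String × Int)) : ∀ (m : Int) (acc : List String),
    pmvLoop l m acc =
      ((if (l.map Prod.snd).foldl max m = m then acc else []) ++
        (l.filter (fun pq => pq.2 == (l.map Prod.snd).foldl max m)).map Prod.fst,
       (l.map Prod.snd).foldl max m) := by
  induction l with
  | nil => intro m acc; simp [pmvLoop]
  | cons hd tl ih =>
    intro m acc
    obtain ⟨p, q⟩ := hd
    by_cases h1 : q > m
    · have hmax : max m q = q := by omega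
      have hge : q ≤ (tl.map Prod.snd).foldl max q := foldl_max_ge _ q
      simp only [pmvLoop, if_pos h1, List.map_cons, List.foldl_cons, hmax, ih]
      have hne : (tl.map Prod.snd).foldl max q ≠ m := by omega
      rw [List.filter_cons]
      by_cases h2 : (tl.map Prod.snd).foldl max q = q
      · simp [h2]
        intro h; omega
      · have h2' : ¬ q = (tl.map Prod.snd).foldl max q := fun h => h2 h.symm
        simp [hne, h2', h2]
    · have hmax : max m q = m := by omega
      have hge : m ≤ (tl.map Prod.snd).foldl max m := foldl_max_ge _ m
      by_cases h2 : q = m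
      · simp only [pmvLoop, if_neg h1, if_pos h2, List.map_cons, List.foldl_cons, hmax, ih]
        rw [List.filter_cons]
        by_cases h3 : (tl.map Prod.snd).foldl max m = m
        · simp [h3, h2]
        · have : q ≠ (tl.map Prod.snd).foldl max m := by omega
          simp [h3, beq_iff_eq, this]
      · have hlt : q < m := by omega
        simp only [pmvLoop, if_neg h1, if_neg h2, List.map_cons, List.foldl_cons, hmax, ih]
        rw [List.filter_cons]
        have : q ≠ (tl.map Prod.snd).foldl max m := by omega
        simp [beq_iff_eq, this]

-- ===== VERDICT (by name: the statement is the Claim_ definition above) =====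
theorem produto_mais_vendido_spec : Claim_equal_produto_mais_vendido := by
  intro vendas _
  unfold Spec_produto_mais_vendido produto_mais_vendido produto_mais_vendido_alt
  rw [pmvLoop_eq]
  split <;> simp
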